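-- pv_equiv track=rewrite | github.com/GonChen/xiaomin | find_val_in_csv/tab_concat_find.py | combine_list_value
-- ===== SOURCE A (Python) =====
-- def combine_list_value(input_list):
--     result = []
--     for iter_row in input_list:
--         if not result:
--             result = list(iter_row)
--         else:
--             result = [item1 +
--                       item2 for item1, item2 in zip(result, iter_row)]
--     return result
-- ===== SOURCE B (Python) =====
-- def combine_list_value(input_list):
--     # transpose-then-reduce: each column of zip(*input_list) is concatenated left-to-right
--     out = []
--     for col in zip(*input_list):
--         acc = col[0]
--         for x in col[1:]:
--             acc = acc + x
--         out.append(acc)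
--     return out
-- ===== Notes on version B (the rewrite author's own statement) =====
-- stated objective: alternative
-- what changed: B transposes the rows with zip(*input_list) and reduces each column left-to-right, instead of A's row-by-row running accumulator with an emptiness-triggered restart.
-- intended difference: On inputs that contain an empty row and whose last row is nonempty, A's 'if not result' restarts the accumulator at each empty row and returns the combination of only the rows after the last empty one, while B returns the empty result, which is intended since some row contributes no elements (A itself returns the empty result whenever the empty row comes last). — e.g. on combine_list_value([[], ["a"]]): A returns ["a"], B returns []
import Mathlib
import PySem

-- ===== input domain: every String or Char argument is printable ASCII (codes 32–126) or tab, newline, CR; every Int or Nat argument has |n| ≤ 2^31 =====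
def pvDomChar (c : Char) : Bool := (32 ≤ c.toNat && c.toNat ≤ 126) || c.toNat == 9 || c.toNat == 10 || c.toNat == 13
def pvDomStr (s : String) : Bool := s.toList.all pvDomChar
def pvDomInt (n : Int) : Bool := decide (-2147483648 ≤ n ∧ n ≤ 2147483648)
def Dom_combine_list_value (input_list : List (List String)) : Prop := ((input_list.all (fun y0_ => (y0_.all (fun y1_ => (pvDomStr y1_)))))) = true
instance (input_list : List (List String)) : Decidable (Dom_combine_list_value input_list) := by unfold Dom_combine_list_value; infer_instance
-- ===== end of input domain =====

-- B rewrites A's row-accumulator fold as transpose(zip(*))-then-reduce over columns; on inputs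
-- with an empty row followed (eventually) by a nonempty last row, A's accidental accumulator
-- restart is replaced by B's intended empty result (see D_ below).


-- ===== PORT A =====
-- literal port of A: fold over rows; empty accumulator is replaced by the row, otherwise
-- elementwise concatenation of zipped pairs (zip truncates to the shorter list, as in Python)
def combine_list_value (input_list : List (List String)) : List String :=
  input_list.foldl
    (fun result iter_row =>
      if result.isEmpty then iter_row
      else (result.zip iter_row).map (fun p => p.1 ++ p.2))
    []

-- ===== PORT B =====
-- acc = col[0]; for x in col[1:]: acc = acc + x
def pvReduce1 (col : List String) : String :=
  match col with
  | [] => ""          -- unreachable: columns produced by pvCols are nonempty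
  | x :: xs => xs.foldl (fun a b => a ++ b) x

-- hand port of zip(*(r :: rs)): emit one column (head of r and of every row of rs)
-- while every row still has an element, recursing on the tails
def pvCols (r : List String) (rs : List (List String)) : List (List String) :=
  match r with
  | [] => []
  | x :: r' =>
    if rs.any List.isEmpty then []
    else (x :: rs.map (fun s => s.headD "")) :: pvCols r' (rs.map List.tail)

def combine_list_value_alt (input_list : List (List String)) : List String :=
  match input_list with
  | [] => []
  | r :: rs => (pvCols r rs).map pvReduce1

-- ===== PRECONDITION & SPEC =====
-- On inputs that contain an empty row and whose last row is nonempty, A restarts its accumulator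
-- at each empty row and returns the combination of only the rows after the last empty one, while
-- B returns the empty result, which is intended since some row contributes no elements
-- (A itself returns the empty result whenever the empty row comes last).
def D_combine_list_value (input_list : List (List String)) : Prop :=
  [] ∈ input_list ∧ input_list.getLast? ≠ some []
instance (input_list : List (List String)) : Decidable (D_combine_list_value input_list) := by
  unfold D_combine_list_value; infer_instance

def Spec_combine_list_value (input_list : List (List String)) (out : List String) : Prop :=
  ¬ D_combine_list_value input_list → out = combine_list_value_alt input_list
instance (input_list : List (List String)) (out : List String) : Decidable (Spec_combine_list_value input_list out) := by unfold Spec_combine_list_value; infer_instance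

def pvDiffWitness_combine_list_value : List (List String) := [[], ["a"]]
def pvDiffWitnessOut_combine_list_value : (List String) × (List String) := (["a"], [])

-- ===== CLAIM (what is proved, stated in full; the proofs are below) =====
def Claim_unchanged_combine_list_value : Prop := ∀ (input_list : List (List String)), Dom_combine_list_value input_list → Spec_combine_list_value input_list (combine_list_value input_list)
def Claim_changed_combine_list_value : Prop := Dom_combine_list_value (pvDiffWitness_combine_list_value) ∧ D_combine_list_value (pvDiffWitness_combine_list_value) ∧ combine_list_value (pvDiffWitness_combine_list_value) = pvDiffWitnessOut_combine_list_value.1 ∧ combine_list_value_alt (pvDiffWitness_combine_list_value) = pvDiffWitnessOut_combine_list_value.2 ∧ pvDiffWitnessOut_combine_list_value.1 ≠ pvDiffWitnessOut_combine_list_value.2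
def Claim_exact_combine_list_value : Prop := ∀ (input_list : List (List String)), Dom_combine_list_value input_list → D_combine_list_value input_list → combine_list_value input_list ≠ combine_list_value_alt input_list

-- ===== LEMMAS AND PROOFS =====

-- abbreviation for A's loop body (proof-side only)
def pvStepA (result iter_row : List String) : List String :=
  if result.isEmpty then iter_row
  else (result.zip iter_row).map (fun p => p.1 ++ p.2)

lemma combine_eq_foldl_step (l : List (List String)) :
    combine_list_value l = l.foldl pvStepA [] := rfl

lemma zip_map_eq_zipWith (a b : List String) :
    (a.zip b).map (fun p => p.1 ++ p.2) = List.zipWith (· ++ ·) a b := by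
  induction a generalizing b with
  | nil => simp
  | cons x a ih => cases b <;> simp [ih]

lemma cols_nil (acc : List String) : (pvCols acc []).map pvReduce1 = acc := by
  induction acc with
  | nil => simp [pvCols]
  | cons x a ih => simp [pvCols, pvReduce1, ih]

lemma cols_shift : ∀ (acc row : List String) (rest : List (List String)),
    (pvCols acc (row :: rest)).map pvReduce1
      = (pvCols (List.zipWith (· ++ ·) acc row) rest).map pvReduce1 := by
  intro acc
  induction acc with
  | nil => intro row rest; simp [pvCols]
  | cons x a ih =>
    intro row rest
    cases row with
    | nil => simp [pvCols]
    | cons y r' =>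
      by_cases h : rest.any List.isEmpty
      · simp [pvCols, h]
      · simp [pvCols, h, pvReduce1, List.foldl, ih]

lemma foldl_cols : ∀ (rs : List (List String)) (acc : List String),
    acc ≠ [] → (∀ row ∈ rs, row ≠ []) →
    rs.foldl pvStepA acc = (pvCols acc rs).map pvReduce1 := by
  intro rs
  induction rs with
  | nil => intro acc _ _; simpa using (cols_nil acc).symm
  | cons row rest ih =>
    intro acc hacc hrows
    have hrow : row ≠ [] := hrows row (by simp)
    have hstep : pvStepA acc row = List.zipWith (· ++ ·) acc row := by
      simp [pvStepA, List.isEmpty_iff, hacc, zip_map_eq_zipWith]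
    have hne : List.zipWith (· ++ ·) acc row ≠ [] := by
      cases acc with
      | nil => exact absurd rfl hacc
      | cons a as => cases row with
        | nil => exact absurd rfl hrow
        | cons b bs => simp
    calc (row :: rest).foldl pvStepA acc
        = rest.foldl pvStepA (List.zipWith (· ++ ·) acc row) := by
          simp [List.foldl, hstep]
      _ = (pvCols (List.zipWith (· ++ ·) acc row) rest).map pvReduce1 :=
          ih _ hne (fun r hr => hrows r (by simp [hr]))
      _ = (pvCols acc (row :: rest)).map pvReduce1 := (cols_shift acc row rest).symm

lemma foldl_last_nil : ∀ (rs : List (List String)) (acc : List String),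
    rs.getLast? = some [] → rs.foldl pvStepA acc = [] := by
  intro rs
  induction rs with
  | nil => intro acc h; simp at h
  | cons row rest ih =>
    intro acc h
    cases rest with
    | nil =>
      have : row = [] := by simpa using h
      subst this
      cases acc <;> simp [pvStepA]
    | cons r2 rest' =>
      have h' : (r2 :: rest').getLast? = some [] := by
        simpa [List.getLast?_cons_cons] using h
      simpa [List.foldl] using ih (pvStepA acc row) h'

lemma step_ne_nil (acc t : List String) (ht : t ≠ []) : pvStepA acc t ≠ [] := by
  cases acc with
  | nil => simpa [pvStepA] using ht
  | cons a as =>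
    cases t with
    | nil => exact absurd rfl ht
    | cons b bs => simp [pvStepA]

lemma foldl_last_ne_nil : ∀ (rs : List (List String)) (acc t : List String),
    rs.getLast? = some t → t ≠ [] → rs.foldl pvStepA acc ≠ [] := by
  intro rs
  induction rs with
  | nil => intro acc t h _; simp at h
  | cons row rest ih =>
    intro acc t h ht
    cases rest with
    | nil =>
      have : row = t := by simpa using h
      subst this
      simpa [List.foldl] using step_ne_nil acc row ht
    | cons r2 rest' =>
      have h' : (r2 :: rest').getLast? = some t := by
        simpa [List.getLast?_cons_cons] using h
      simpa [List.foldl] using ih (pvStepA acc row) t h' ht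

lemma alt_nil_of_mem (l : List (List String)) (h : [] ∈ l) :
    combine_list_value_alt l = [] := by
  cases l with
  | nil => rfl
  | cons r rs =>
    cases r with
    | nil => simp [combine_list_value_alt, pvCols]
    | cons x r' =>
      have hmem : [] ∈ rs := by
        rcases List.mem_cons.mp h with h | h
        · exact absurd h (by simp)
        · exact h
      have hany : rs.any List.isEmpty = true := by
        exact List.any_eq_true.mpr ⟨[], hmem, by simp⟩
      simp [combine_list_value_alt, pvCols, hany]

-- ===== VERDICT (by name: the statement is the Claim_ definition above) =====
theorem combine_list_value_spec : Claim_unchanged_combine_list_value := by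
  intro l _ hnD
  by_cases hm : [] ∈ l
  · -- ¬D with [] ∈ l forces the last row to be empty: both sides are []
    have hlast : l.getLast? = some [] := by
      by_contra h
      exact hnD ⟨hm, h⟩
    rw [combine_eq_foldl_step, foldl_last_nil l [] hlast, alt_nil_of_mem l hm]
  · -- no empty row: A's fold equals B's column reduction
    cases l with
    | nil => rfl
    | cons r rs =>
      have hr : r ≠ [] := fun h => hm (by simp [h])
      have hrows : ∀ row ∈ rs, row ≠ [] := by
        intro row hrow h
        exact hm (by simp [h ▸ hrow])
      have h1 : combine_list_value (r :: rs) = rs.foldl pvStepA r := by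
        simp [combine_eq_foldl_step, List.foldl, pvStepA]
      rw [h1, foldl_cols rs r hr hrows]
      rfl

theorem combine_list_value_changed : Claim_changed_combine_list_value := by
  unfold Claim_changed_combine_list_value; decide

theorem combine_list_value_tight : Claim_exact_combine_list_value := by
  intro l _ hD
  obtain ⟨hm, hlast⟩ := hD
  have hne : l ≠ [] := by rintro rfl; simp at hm
  cases ht : l.getLast? with
  | none => exact absurd (List.getLast?_eq_none_iff.mp ht) hne
  | some t =>
  have htne : t ≠ [] := fun h => hlast (h ▸ ht)
  rw [combine_eq_foldl_step, alt_nil_of_mem l hm]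
  exact foldl_last_ne_nil l [] t ht htne
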